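-- pv_equiv track=rewrite | github.com/nomelancholy/problem_solving | 프로그래머스/unrated/181890. 왼쪽 오른쪽/왼쪽 오른쪽.py | solution
-- ===== SOURCE A (Python) =====
-- def solution(str_list):
--     answer = []
--
--     if 'l' in str_list or 'r' in str_list:
--         for i, c in enumerate(str_list):
--             if c == 'l':
--                 answer = str_list[:i]
--                 break
--             elif c == 'r':
--                 answer = str_list[i + 1:]
--                 break
--
--     return answer
-- ===== SOURCE B (Python) =====
-- def solution(str_list):
--     n = len(str_list)
--     l_idx = str_list.index('l') if 'l' in str_list else n
--     r_idx = str_list.index('r') if 'r' in str_list else n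
--     if l_idx == n and r_idx == n:
--         return []
--     if l_idx < r_idx:
--         return str_list[:l_idx]
--     return str_list[r_idx + 1:]
-- ===== Notes on version B (the rewrite author's own statement) =====
-- stated objective: alternative
-- what changed: Replaces the enumerate-and-break scan with branch-per-element slicing by a locate-both decomposition: find the first index of 'l' and of 'r' independently (length sentinel when absent), then compare the two indices once to pick the slice.
import Mathlib
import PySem

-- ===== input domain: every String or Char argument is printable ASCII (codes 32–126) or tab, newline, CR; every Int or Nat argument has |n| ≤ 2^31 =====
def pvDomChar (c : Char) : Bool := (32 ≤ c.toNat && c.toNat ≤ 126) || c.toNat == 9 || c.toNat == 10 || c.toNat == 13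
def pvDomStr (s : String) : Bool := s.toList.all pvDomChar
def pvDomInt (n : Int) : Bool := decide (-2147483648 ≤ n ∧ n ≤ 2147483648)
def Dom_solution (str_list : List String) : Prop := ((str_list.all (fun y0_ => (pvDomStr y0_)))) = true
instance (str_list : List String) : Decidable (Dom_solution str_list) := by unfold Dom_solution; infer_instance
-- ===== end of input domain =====

-- B replaces A's single enumerate-and-break scan (slice at the first 'l'/'r' hit) by a
-- locate-both-then-compare decomposition: find the first index of 'l' and of 'r'
-- independently (length sentinel when absent) and pick the slice by one comparison.

-- ===== PORT A =====
-- the for/enumerate loop with break: index counter i over the remaining suffix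
def solutionLoop (full : List String) (i : Nat) (rest : List String) : List String :=
  match rest with
  | [] => []
  | c :: cs =>
    if c = "l" then PySem.List.slice full none (some (i : Int))          -- str_list[:i]
    else if c = "r" then PySem.List.slice full (some ((i : Int) + 1)) none  -- str_list[i+1:]
    else solutionLoop full (i + 1) cs

def solution (str_list : List String) : List String :=
  if str_list.contains "l" || str_list.contains "r" then
    solutionLoop str_list 0 str_list
  else []

-- ===== PORT B =====
def solution_alt (str_list : List String) : List String :=
  let n := str_list.length
  let lIdx := if str_list.contains "l" then (PySem.List.index? str_list "l").getD n else n
  let rIdx := if str_list.contains "r" then (PySem.List.index? str_list "r").getD n else n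
  if lIdx = n ∧ rIdx = n then []
  else if lIdx < rIdx then PySem.List.slice str_list none (some (lIdx : Int))
  else PySem.List.slice str_list (some ((rIdx : Int) + 1)) none

-- ===== PRECONDITION & SPEC =====
def Spec_solution (str_list : List String) (out : List String) : Prop := out = solution_alt str_list
instance (str_list : List String) (out : List String) : Decidable (Spec_solution str_list out) := by unfold Spec_solution; infer_instance

-- ===== CLAIM (what is proved, stated in full; the proofs are below) =====
def Claim_equal_solution : Prop := ∀ (str_list : List String), Dom_solution str_list → Spec_solution str_list (solution str_list)

-- ===== LEMMAS AND PROOFS =====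

-- common reference function: scan rest carrying the already-seen prefix
def auxA (pre rest : List String) : List String :=
  match rest with
  | [] => []
  | c :: cs => if c = "l" then pre else if c = "r" then cs else auxA (pre ++ [c]) cs

theorem auxA_of_not_mem (pre : List String) (rest : List String)
    (hl : "l" ∉ rest) (hr : "r" ∉ rest) : auxA pre rest = [] := by
  induction rest generalizing pre with
  | nil => rfl
  | cons c cs ih =>
    simp only [List.mem_cons, not_or] at hl hr
    simp [auxA, Ne.symm hl.1, Ne.symm hr.1, ih _ hl.2 hr.2]

theorem drop_succ_append (pre cs : List String) (c : String) :
    PySem.List.slice (pre ++ c :: cs) (some ((pre.length : Int) + 1)) none = cs := by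
  have h1 : ((pre.length : Int) + 1) = ((pre.length + 1 : Nat) : Int) := by push_cast; ring
  have h2 : pre ++ c :: cs = (pre ++ [c]) ++ cs := by simp
  rw [h1, PySem.List.slice_from_natCast, h2,
    show pre.length + 1 = (pre ++ [c]).length from by simp, List.drop_left]

theorem loop_eq_auxA (rest pre : List String) :
    solutionLoop (pre ++ rest) pre.length rest = auxA pre rest := by
  induction rest generalizing pre with
  | nil => rfl
  | cons c cs ih =>
    by_cases hcl : c = "l"
    · subst hcl
      simp [solutionLoop, auxA, PySem.List.slice_to_natCast]
    · by_cases hcr : c = "r"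
      · subst hcr
        simp [solutionLoop, auxA, hcl, drop_succ_append]
      · have h2 : pre ++ c :: cs = (pre ++ [c]) ++ cs := by simp
        simp only [solutionLoop, auxA, if_neg hcl, if_neg hcr]
        have := ih (pre ++ [c])
        rw [h2]
        simpa using this

-- first index of v in pre ++ c :: cs is strictly after pre.length when v is in neither pre nor {c}
theorem idx_big (pre cs : List String) (c v : String) (hv : v ∉ pre) (hvc : c ≠ v) :
    ∀ j, PySem.List.index? (pre ++ c :: cs) v = some j → pre.length < j := by
  intro j hj
  obtain ⟨hjlt, hget, hbefore⟩ := PySem.List.getElem_of_index?_eq_some hj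
  by_contra hle
  rcases lt_or_eq_of_le (Nat.le_of_not_lt hle) with hlt | heq
  · rw [List.getElem_append_left hlt] at hget
    exact hv (hget ▸ List.getElem_mem _)
  · subst heq
    rw [List.getElem_append_right (Nat.le_refl _)] at hget
    simp at hget
    exact hvc hget

theorem alt_eq_auxA (rest pre : List String)
    (hl : "l" ∉ pre) (hr : "r" ∉ pre) :
    solution_alt (pre ++ rest) = auxA pre rest := by
  induction rest generalizing pre with
  | nil =>
    simp only [List.append_nil, auxA]
    simp [solution_alt, hl, hr]
  | cons c cs ih =>
    by_cases hcl : c = "l"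
    · subst hcl
      have hlmem : "l" ∈ pre ++ "l" :: cs := by simp
      have hli : PySem.List.index? (pre ++ "l" :: cs) "l" = some pre.length := by
        rw [PySem.List.index?_eq_some_iff]
        exact ⟨pre, cs, rfl, rfl, hl⟩
      have hli' : List.idxOf? "l" (pre ++ "l" :: cs) = some pre.length := by
        rw [← PySem.List.index?_eq_idxOf?]; exact hli
      have hlen : pre.length < (pre ++ "l" :: cs).length := by simp
      rw [show auxA pre ("l" :: cs) = pre from by simp [auxA]]
      by_cases hcr : "r" ∈ pre ++ "l" :: cs
      · obtain ⟨j, hj⟩ : ∃ j, PySem.List.index? (pre ++ "l" :: cs) "r" = some j :=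
          Option.isSome_iff_exists.mp (by rw [PySem.List.index?_isSome_iff]; exact hcr)
        have hjgt := idx_big pre cs "l" "r" hr (by decide) j hj
        have hj' : List.idxOf? "r" (pre ++ "l" :: cs) = some j := by
          rw [← PySem.List.index?_eq_idxOf?]; exact hj
        simp [solution_alt, hlmem, hli', hcr, hj', hjgt,
          PySem.List.slice_to_natCast]
      · simp [solution_alt, hlmem, hli', hcr, hlen,
          PySem.List.slice_to_natCast]
    · by_cases hcr : c = "r"
      · subst hcr
        have hrmem : "r" ∈ pre ++ "r" :: cs := by simp
        have hri : PySem.List.index? (pre ++ "r" :: cs) "r" = some pre.length := by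
          rw [PySem.List.index?_eq_some_iff]
          exact ⟨pre, cs, rfl, rfl, hr⟩
        have hri' : List.idxOf? "r" (pre ++ "r" :: cs) = some pre.length := by
          rw [← PySem.List.index?_eq_idxOf?]; exact hri
        have hlen : pre.length < (pre ++ "r" :: cs).length := by simp
        rw [show auxA pre ("r" :: cs) = cs from by simp [auxA, hcl]]
        by_cases hcll : "l" ∈ pre ++ "r" :: cs
        · obtain ⟨j, hj⟩ : ∃ j, PySem.List.index? (pre ++ "r" :: cs) "l" = some j :=
            Option.isSome_iff_exists.mp (by rw [PySem.List.index?_isSome_iff]; exact hcll)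
          have hjgt := idx_big pre cs "r" "l" hl (by decide) j hj
          have hj' : List.idxOf? "l" (pre ++ "r" :: cs) = some j := by
            rw [← PySem.List.index?_eq_idxOf?]; exact hj
          simp [solution_alt, hrmem, hri', hcll, hj', Nat.not_lt.mpr (Nat.le_of_lt hjgt),
            drop_succ_append]
        · simp [solution_alt, hrmem, hri', hcll, drop_succ_append]
      · have h2 : pre ++ c :: cs = (pre ++ [c]) ++ cs := by simp
        have hl' : "l" ∉ pre ++ [c] := by simp [hl, Ne.symm hcl]
        have hr' : "r" ∉ pre ++ [c] := by simp [hr, Ne.symm hcr]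
        rw [h2, ih (pre ++ [c]) hl' hr']
        simp [auxA, hcl, hcr]

-- ===== VERDICT (by name: the statement is the Claim_ definition above) =====
theorem solution_spec : Claim_equal_solution := by
  intro xs _
  show solution xs = solution_alt xs
  have halt : solution_alt xs = auxA [] xs := by
    simpa using alt_eq_auxA xs [] (by simp) (by simp)
  rw [halt]
  unfold solution
  by_cases h : xs.contains "l" || xs.contains "r"
  · rw [if_pos h]
    simpa using loop_eq_auxA xs []
  · rw [if_neg h]
    simp only [Bool.or_eq_true, not_or, Bool.not_eq_true] at h
    exact (auxA_of_not_mem [] xs (by simpa using h.1) (by simpa using h.2)).symm
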